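-- pv_equiv track=rewrite | github.com/LuiccianDev/daily-challenge-codedex-march-2026 | days/day-30/ye-olde-emoticons.py | emoticons_mood
-- ===== SOURCE A (Python) =====
-- def emoticons_mood(message):
--
--     # Validación de entrada
--     if not isinstance(message, str):
--         raise TypeError("El parámetro 'message' debe ser una cadena de texto.")
--     if not message:
--         return 0  # Mensaje vacío → sin impacto
--
--     # Constantes de moticonos felices
--     happy_emoticons = {":)", ":p", "XD", ":3", "<3", r"\m/"}
--
--     # Constantes de emoticonos tristes
--     sad_emoticons = {":(", ":'(", "t(-.-t)"}
--
--     score = 0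
--     # contar ocurrencias de cada emoticono
--     for emoticon in happy_emoticons:
--         score += message.count(emoticon)
--
--     for emoticon in sad_emoticons:
--         score -= message.count(emoticon)
--
--     return score
-- ===== SOURCE B (Python) =====
-- def emoticons_mood(message):
--     # One pass over positions: each emoticon carries a sign; test every start index.
--     if not isinstance(message, str):
--         raise TypeError("El parámetro 'message' debe ser una cadena de texto.")
--     if not message:
--         return 0
--
--     signs = {":)": 1, ":p": 1, "XD": 1, ":3": 1, "<3": 1, r"\m/": 1,
--              ":(": -1, ":'(": -1, "t(-.-t)": -1}
--
--     score = 0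
--     for i in range(len(message)):
--         for emo, s in signs.items():
--             if message.startswith(emo, i):
--                 score += s
--     return score
-- ===== Notes on version B (the rewrite author's own statement) =====
-- stated objective: alternative
-- what changed: Replaces nine independent str.count passes over two sign-specific sets with a single left-to-right scan over start positions that tests each emoticon from one emoticon->sign dict and adds the sign on a match.
import Mathlib
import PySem

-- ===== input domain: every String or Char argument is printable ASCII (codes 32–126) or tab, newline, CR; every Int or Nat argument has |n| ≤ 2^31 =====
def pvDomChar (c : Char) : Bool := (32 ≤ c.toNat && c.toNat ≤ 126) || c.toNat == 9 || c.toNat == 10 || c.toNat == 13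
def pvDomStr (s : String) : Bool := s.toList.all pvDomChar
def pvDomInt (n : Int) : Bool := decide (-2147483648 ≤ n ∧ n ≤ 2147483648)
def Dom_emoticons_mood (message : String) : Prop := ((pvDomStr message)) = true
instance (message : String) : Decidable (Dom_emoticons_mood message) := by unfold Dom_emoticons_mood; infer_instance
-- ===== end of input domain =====

-- B replaces nine independent str.count passes with a single scan over start positions
-- using one emoticon→sign dict (alternative decomposition, same cost).

-- ===== PORT A =====
-- A iterates two set literals of emoticons and sums/subtracts message.count(e);
-- the sets have distinct elements and the score is a sum, so the list order below is faithful.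
def emoticons_mood (message : String) : Int :=
  if message.toList = [] then 0
  else
    let happy : PySem.Set String := PySem.Set.ofList [":)", ":p", "XD", ":3", "<3", "\\m/"]
    let sad : PySem.Set String := PySem.Set.ofList [":(", ":'(", "t(-.-t)"]
    let score : Int := 0
    let score := happy.foldl (fun acc e => acc + (PySem.Str.count message e : Int)) score
    let score := sad.foldl (fun acc e => acc - (PySem.Str.count message e : Int)) score
    score

-- ===== PORT B =====
-- message.startswith(emo, i) with 0 ≤ i < len(message) is ported exactly as
-- a prefix test on (message.toList.drop i.toNat).
def emoticons_mood_alt (message : String) : Int :=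
  if message.toList = [] then 0
  else
    let signs : List (String × Int) :=
      [(":)", 1), (":p", 1), ("XD", 1), (":3", 1), ("<3", 1), ("\\m/", 1),
       (":(", -1), (":'(", -1), ("t(-.-t)", -1)]
    (PySem.List.pyRange 0 (PySem.Str.len message) 1).foldl
      (fun score i =>
        signs.foldl
          (fun sc es =>
            if PySem.Chars.startswith (message.toList.drop i.toNat) es.1.toList then sc + es.2
            else sc)
          score)
      0

-- ===== PRECONDITION & SPEC =====
def Spec_emoticons_mood (message : String) (out : Int) : Prop := out = emoticons_mood_alt message
instance (message : String) (out : Int) : Decidable (Spec_emoticons_mood message out) := by unfold Spec_emoticons_mood; infer_instance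

-- ===== CLAIM (what is proved, stated in full; the proofs are below) =====
def Claim_equal_emoticons_mood : Prop := ∀ (message : String), Dom_emoticons_mood message → Spec_emoticons_mood message (emoticons_mood message)

-- ===== LEMMAS AND PROOFS =====

-- number of start positions (over all tails) at which p matches
def pvPc (p : List Char) : List Char → Nat
  | [] => 0
  | h :: t => (if p.isPrefixOf (h :: t) then 1 else 0) + pvPc p t

-- p has no nonempty proper border (no self-overlap)
abbrev pvNoBorder (p : List Char) : Prop :=
  ∀ k, k < p.length → 0 < k → ¬ ((p.drop k).isPrefixOf p = true)

-- a match of a border-free pattern excludes matches at the next p.length - 1 positions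
theorem pvNoOverlap {p l : List Char} (hnb : pvNoBorder p)
    (hm : p.isPrefixOf l = true) {k : Nat} (hk0 : 0 < k) (hk : k < p.length) :
    ¬ (p.isPrefixOf (l.drop k) = true) := by
  intro hm'
  rw [List.isPrefixOf_iff_prefix] at hm hm'
  obtain ⟨r, rfl⟩ := hm
  rw [List.drop_append_of_le_length (Nat.le_of_lt hk)] at hm'
  have h1 : p.drop k <+: p.drop k ++ r := List.prefix_append _ _
  have h2 : p.drop k <+: p := by
    apply List.prefix_of_prefix_length_le h1 hm'
    simp
  exact hnb k hk hk0 (List.isPrefixOf_iff_prefix.mpr h2)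

-- pvPc is constant across a stretch of non-matching positions
theorem pvPc_chain (p l : List Char) :
    ∀ (d j : Nat), j + d ≤ l.length →
      (∀ m, j ≤ m → m < j + d → ¬ (p.isPrefixOf (l.drop m) = true)) →
      pvPc p (l.drop j) = pvPc p (l.drop (j + d)) := by
  intro d
  induction d with
  | zero => intro j _ _; rfl
  | succ d ih =>
    intro j hle hno
    have hj : j < l.length := by omega
    rw [List.drop_eq_getElem_cons hj]
    have : pvPc p (l[j] :: l.drop (j + 1)) =
        (if p.isPrefixOf (l[j] :: l.drop (j + 1)) then 1 else 0) + pvPc p (l.drop (j + 1)) := rfl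
    rw [this, ← List.drop_eq_getElem_cons hj]
    rw [if_neg (hno j le_rfl (by omega)), Nat.zero_add]
    have hidx : j + (d + 1) = (j + 1) + d := by omega
    rw [hidx]
    exact ih (j + 1) (by omega) (fun m hm1 hm2 => hno m (by omega) (by omega))

-- a border-free match contributes exactly 1 and skipping its length loses nothing
theorem pvPc_skip {p l : List Char} (hnb : pvNoBorder p) (hne : p ≠ [])
    (hm : p.isPrefixOf l = true) :
    pvPc p l = 1 + pvPc p (l.drop p.length) := by
  have hlen : p.length ≤ l.length := (List.isPrefixOf_iff_prefix.mp hm).length_le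
  have hp1 : 1 ≤ p.length := List.length_pos_iff.mpr hne
  obtain ⟨h, t, rfl⟩ : ∃ h t, l = h :: t := by
    cases l with
    | nil =>
      simp only [List.length_nil, Nat.le_zero] at hlen
      exact absurd (List.length_eq_zero_iff.mp hlen) hne
    | cons h t => exact ⟨h, t, rfl⟩
  have : pvPc p (h :: t) = (if p.isPrefixOf (h :: t) then 1 else 0) + pvPc p t := rfl
  rw [this, if_pos hm]
  congr 1
  have hch := pvPc_chain p (h :: t) (p.length - 1) 1
    (by simp only [List.length_cons] at hlen ⊢; omega)
    (fun m hm1 hm2 => pvNoOverlap hnb hm hm1 (by omega))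
  have hidx : 1 + (p.length - 1) = p.length := by omega
  rw [hidx] at hch
  simpa using hch

-- the fuelled non-overlapping counter of Chars.count equals pvPc for border-free patterns
theorem pvGo_eq {p : List Char} (hnb : pvNoBorder p) (hne : p ≠ []) :
    ∀ (fuel : Nat) (l : List Char) (acc : Nat), l.length ≤ fuel →
      PySem.Chars.count.go p fuel l acc = acc + pvPc p l := by
  intro fuel
  induction fuel with
  | zero =>
    intro l acc hle
    have : l = [] := List.length_eq_zero_iff.mp (Nat.le_zero.mp hle)
    subst this
    rw [PySem.Chars.count.go.eq_def]
    rfl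
  | succ fuel ih =>
    intro l acc hle
    cases l with
    | nil => rw [PySem.Chars.count.go.eq_def]; rfl
    | cons h t =>
      rw [PySem.Chars.count.go.eq_def]
      simp only
      by_cases hm : p.isPrefixOf (h :: t) = true
      · rw [if_pos hm]
        have hp1 : 1 ≤ p.length := List.length_pos_iff.mpr hne
        have hdlen : ((h :: t).drop p.length).length ≤ fuel := by
          simp only [List.length_drop, List.length_cons] at *
          omega
        rw [ih _ _ hdlen, pvPc_skip hnb hne hm]
        omega
      · rw [if_neg hm]
        have : pvPc p (h :: t) = (if p.isPrefixOf (h :: t) then 1 else 0) + pvPc p t := rfl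
        rw [ih t acc (by simp at hle ⊢; omega), this, if_neg hm]
        omega

theorem pvCount_eq {p : List Char} (hnb : pvNoBorder p) (hne : p ≠ []) (l : List Char) :
    PySem.Chars.count l p = pvPc p l := by
  unfold PySem.Chars.count
  rw [if_neg (by simpa using hne)]
  simpa using pvGo_eq hnb hne l.length l 0 le_rfl

-- a generic fold with a guarded addition is the initial value plus a sum of guarded terms
theorem pvFoldl_ite_add {α : Type} (c : α → Bool) (f : α → Int) :
    ∀ (xs : List α) (a : Int),
      xs.foldl (fun sc x => if c x then sc + f x else sc) a
        = a + (xs.map (fun x => if c x then f x else 0)).sum := by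
  intro xs
  induction xs with
  | nil => intro a; simp
  | cons x xs ih =>
    intro a
    simp only [List.foldl_cons, List.map_cons, List.sum_cons]
    by_cases h : c x = true
    · rw [if_pos h, if_pos h, ih]; ring
    · rw [if_neg h, if_neg h, ih]; ring

-- the positional sum of a guarded constant equals the sign times the position count
theorem pvSum_tails (p : List Char) (s : Int) :
    ∀ (l : List Char),
      ((List.range l.length).map
        (fun k => if p.isPrefixOf (l.drop k) then s else 0)).sum = s * (pvPc p l : Int) := by
  intro l
  induction l with
  | nil => simp [pvPc]
  | cons h t ih =>
    rw [List.length_cons, List.range_succ_eq_map]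
    simp only [List.map_cons, List.map_map, List.sum_cons]
    have hcomp : ((List.range t.length).map
        (fun k => if p.isPrefixOf ((h :: t).drop (Nat.succ k)) then s else 0)).sum
        = s * (pvPc p t : Int) := by
      simpa using ih
    have : pvPc p (h :: t) = (if p.isPrefixOf (h :: t) then 1 else 0) + pvPc p t := rfl
    rw [this]
    have hmapeq : (List.map ((fun k => if p.isPrefixOf (List.drop k (h :: t)) then s else 0) ∘ Nat.succ)
        (List.range t.length)).sum
        = ((List.range t.length).map
            (fun k => if p.isPrefixOf ((h :: t).drop (Nat.succ k)) then s else 0)).sum := rfl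
    rw [hmapeq, hcomp, List.drop_zero]
    by_cases hm : p.isPrefixOf (h :: t) = true
    · rw [if_pos hm, if_pos hm]; push_cast; ring
    · rw [if_neg hm, if_neg hm]; push_cast; ring

-- B's nested fold as a linear combination of the nine positional counts
theorem pvAltSum (msg : List Char) :
    (PySem.List.pyRange 0 (msg.length : Int) 1).foldl
      (fun score i =>
        ([(":)", 1), (":p", 1), ("XD", 1), (":3", 1), ("<3", 1), ("\\m/", 1),
          (":(", -1), (":'(", -1), ("t(-.-t)", -1)] : List (String × Int)).foldl
          (fun sc es =>
            if PySem.Chars.startswith (msg.drop i.toNat) es.1.toList then sc + es.2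
            else sc)
          score)
      0
    = (pvPc ":)".toList msg : Int) + (pvPc ":p".toList msg : Int) + (pvPc "XD".toList msg : Int)
      + (pvPc ":3".toList msg : Int) + (pvPc "<3".toList msg : Int) + (pvPc "\\m/".toList msg : Int)
      - (pvPc ":(".toList msg : Int) - (pvPc ":'(".toList msg : Int)
      - (pvPc "t(-.-t)".toList msg : Int) := by
  have hinner : ∀ (i : Int),
      (fun score => ([(":)", 1), (":p", 1), ("XD", 1), (":3", 1), ("<3", 1), ("\\m/", 1),
          (":(", -1), (":'(", -1), ("t(-.-t)", -1)] : List (String × Int)).foldl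
          (fun sc es =>
            if PySem.Chars.startswith (msg.drop i.toNat) es.1.toList then sc + es.2
            else sc)
          score)
      = (fun score => score +
          (([(":)", 1), (":p", 1), ("XD", 1), (":3", 1), ("<3", 1), ("\\m/", 1),
            (":(", -1), (":'(", -1), ("t(-.-t)", -1)] : List (String × Int)).map
            (fun es => if PySem.Chars.startswith (msg.drop i.toNat) es.1.toList then es.2 else 0)).sum) := by
    intro i
    funext score
    exact pvFoldl_ite_add _ _ _ score
  refine Eq.trans (PySem.List.foldl_congr_mem _ _ _ _ (fun acc b _ => congrFun (hinner b) acc)) ?_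
  rw [PySem.List.foldl_add]
  simp only [PySem.List.pyRange_one, List.map_map, Function.comp_def, zero_add]
  have hz : ((msg.length : Int) - 0).toNat = msg.length := by simp
  rw [hz]
  simp only [List.map_cons, List.map_nil, List.sum_cons, List.sum_nil,
    PySem.Chars.startswith, Int.toNat_natCast, add_zero]
  simp only [PySem.List.sum_map_add_int]
  rw [pvSum_tails ":)".toList 1 msg, pvSum_tails ":p".toList 1 msg,
    pvSum_tails "XD".toList 1 msg, pvSum_tails ":3".toList 1 msg,
    pvSum_tails "<3".toList 1 msg, pvSum_tails "\\m/".toList 1 msg,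
    pvSum_tails ":(".toList (-1) msg, pvSum_tails ":'(".toList (-1) msg,
    pvSum_tails "t(-.-t)".toList (-1) msg]
  ring

-- ===== VERDICT (by name: the statement is the Claim_ definition above) =====
theorem emoticons_mood_spec : Claim_equal_emoticons_mood := by
  intro message _
  unfold Spec_emoticons_mood emoticons_mood emoticons_mood_alt
  by_cases hnil : message.toList = []
  · rw [if_pos hnil, if_pos hnil]
  · rw [if_neg hnil, if_neg hnil]
    rw [show PySem.Str.len message = (message.toList.length : Int) from by
      simp [PySem.Str.len_eq]]
    rw [pvAltSum message.toList]
    rw [show (PySem.Set.ofList [":)", ":p", "XD", ":3", "<3", "\\m/"] : PySem.Set String)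
        = [":)", ":p", "XD", ":3", "<3", "\\m/"] from by decide]
    rw [show (PySem.Set.ofList [":(", ":'(", "t(-.-t)"] : PySem.Set String)
        = [":(", ":'(", "t(-.-t)"] from by decide]
    simp only [List.foldl_cons, List.foldl_nil, PySem.Str.count_eq]
    rw [pvCount_eq (p := ":)".toList) (by decide) (by decide) message.toList,
      pvCount_eq (p := ":p".toList) (by decide) (by decide) message.toList,
      pvCount_eq (p := "XD".toList) (by decide) (by decide) message.toList,
      pvCount_eq (p := ":3".toList) (by decide) (by decide) message.toList,
      pvCount_eq (p := "<3".toList) (by decide) (by decide) message.toList,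
      pvCount_eq (p := "\\m/".toList) (by decide) (by decide) message.toList,
      pvCount_eq (p := ":(".toList) (by decide) (by decide) message.toList,
      pvCount_eq (p := ":'(".toList) (by decide) (by decide) message.toList,
      pvCount_eq (p := "t(-.-t)".toList) (by decide) (by decide) message.toList]
    ring
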